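-- pv_equiv track=rewrite | github.com/python-decoded/check_io | tasks/escher_tasks/task_12__buttons.py | buttons_2
-- ===== SOURCE A (Python) =====
-- def get_group(matrix: list[str], item: tuple[int, int]) -> set:
--
--     to_visit = {item}
--     visited = set()
--     deltas = [(1, 0), (0, 1), (-1, 0), (0, -1)]
--
--     while to_visit:
--         x, y = to_visit.pop()
--         visited.add((x, y))
--
--         for dx, dy in deltas:
--             if y + dy not in range(len(matrix)):
--                 continue
--             if x + dx not in range(len(matrix[0])):
--                 continue
--
--             if matrix[y + dy][x + dx] == "0":
--                 continue
--             if (x + dx, y + dy) in visited: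
--                 continue
--
--             to_visit.add((x + dx, y + dy))
--
--     return visited
--
-- def buttons_2(ceiling: str):
--
--     matrix = [line.strip()
--               for line in ceiling.splitlines()
--               if line.strip()]
--     height, width = len(matrix), len(matrix[0])
--     to_visit = {(x, y)
--                 for x in range(width)
--                 for y in range(height)
--                 if matrix[y][x] != "0"}
--
--     groups = []
--
--     while to_visit:
--         x, y = to_visit.pop()
--         group: set = get_group(matrix, (x, y))
--         group_weight = sum(int(matrix[y][x]) for x, y in group)
--         groups.append(group_weight)
--         to_visit -= group
--
--     return sorted(groups, reverse=True)
-- ===== SOURCE B (Python) =====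
-- def buttons_2(ceiling: str):
--     matrix = [line.strip()
--               for line in ceiling.splitlines()
--               if line.strip()]
--     height, width = len(matrix), len(matrix[0])
--
--     seen = set()
--     weights = []
--
--     for y in range(height):
--         for x in range(width):
--             if matrix[y][x] == "0" or (x, y) in seen:
--                 continue
--             total = 0
--             stack = [(x, y)]
--             while stack:
--                 cx, cy = stack.pop()
--                 if (cx, cy) in seen:
--                     continue
--                 seen.add((cx, cy))
--                 total += int(matrix[cy][cx])
--                 for nx, ny in ((cx + 1, cy), (cx - 1, cy), (cx, cy + 1), (cx, cy - 1)):
--                     if 0 <= nx < width and 0 <= ny < height \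
--                             and matrix[ny][nx] != "0" and (nx, ny) not in seen:
--                         stack.append((nx, ny))
--             weights.append(total)
--
--     return sorted(weights, reverse=True)
-- ===== Notes on version B (the rewrite author's own statement) =====
-- stated objective: alternative
-- what changed: Replaces A's repeated flood fill driven by a global to_visit set (get_group builds each component as a set, its weight is summed afterwards, and the component is removed by set subtraction) with a single row-major scan that runs an explicit-stack DFS from each not-yet-seen non-zero cell, accumulating the component weight on the fly in one shared visited set.
import Mathlib
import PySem

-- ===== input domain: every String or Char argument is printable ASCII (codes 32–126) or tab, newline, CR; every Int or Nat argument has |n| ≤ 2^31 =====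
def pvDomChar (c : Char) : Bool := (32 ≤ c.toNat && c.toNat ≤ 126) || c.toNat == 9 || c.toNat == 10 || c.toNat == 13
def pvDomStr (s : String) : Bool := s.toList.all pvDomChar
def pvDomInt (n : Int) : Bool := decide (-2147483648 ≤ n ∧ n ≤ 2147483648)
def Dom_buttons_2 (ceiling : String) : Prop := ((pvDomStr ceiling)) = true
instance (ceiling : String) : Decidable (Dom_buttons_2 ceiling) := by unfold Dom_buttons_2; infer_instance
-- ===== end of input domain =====

-- B replaces A's repeated set-arithmetic flood fill (get_group + set subtraction) by one
-- row-major scan with an explicit-stack DFS that accumulates each component's weight on the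
-- fly (objective: alternative, same asymptotic cost).

-- Helpers shared by both ports: they transliterate Python fragments that are IDENTICAL in A
-- and B ('[line.strip() for line in ceiling.splitlines() if line.strip()]', 'matrix[y][x]',
-- 'int(matrix[y][x])', len(matrix), len(matrix[0])).
def pvMatrix (ceiling : String) : List (List Char) :=
  ((PySem.Chars.splitlines ceiling.toList).map PySem.Chars.strip).filter (fun l => decide (l ≠ []))

def pvHeight (m : List (List Char)) : Nat := m.length          -- len(matrix)
def pvWidth (m : List (List Char)) : Nat :=
  (PySem.List.pyGetD m 0 []).length                            -- len(matrix[0]); m ≠ [] under Pre_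

-- matrix[y][x]; always used with in-range x, y (guaranteed by the bounds checks / Pre_),
-- so the total pyGetD form with an arbitrary default is exact there.
def pvCell (m : List (List Char)) (x y : Int) : Char :=
  PySem.List.pyGetD (PySem.List.pyGetD m y []) x '0'

-- int(matrix[y][x]); the cell is a single digit under Pre_, so ofChars? returns some.
def pvVal (m : List (List Char)) (c : Int × Int) : Int :=
  (PySem.Int.ofChars? [pvCell m c.1 c.2]).getD 0

-- ===== PORT A =====
def pvDeltas : List (Int × Int) := [(1,0),(0,1),(-1,0),(0,-1)]

-- body of get_group's 'for dx, dy in deltas' (the chain of 'continue's, in source order)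
def pvExpStep (m : List (List Char)) (x y : Int) (visited : PySem.Set (Int × Int))
    (tv : PySem.Set (Int × Int)) (d : Int × Int) : PySem.Set (Int × Int) :=
  if (0 ≤ y + d.2 ∧ y + d.2 < (pvHeight m : Int)) ∧
     (0 ≤ x + d.1 ∧ x + d.1 < (pvWidth m : Int)) ∧
     pvCell m (x + d.1) (y + d.2) ≠ '0' ∧
     ¬ (PySem.Set.contains visited (x + d.1, y + d.2) = true)
  then PySem.Set.add tv (x + d.1, y + d.2) else tv

-- get_group's while loop; Python's set.pop() takes an unspecified element, ported as the
-- first one (the returned set is the same). The fuel only makes the recursion total; under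
-- the loop's invariant it is never exhausted (each iteration visits one new in-bounds cell).
def pvGroupLoop (m : List (List Char)) :
    Nat → PySem.Set (Int × Int) → PySem.Set (Int × Int) → PySem.Set (Int × Int)
  | 0, _, visited => visited
  | fuel + 1, to_visit, visited =>
    match to_visit with
    | [] => visited
    | c :: rest =>
      pvGroupLoop m fuel (pvDeltas.foldl (pvExpStep m c.1 c.2 (PySem.Set.add visited c)) rest)
        (PySem.Set.add visited c)

def pvGetGroup (m : List (List Char)) (item : Int × Int) : PySem.Set (Int × Int) :=
  pvGroupLoop m (pvHeight m * pvWidth m + 1) (PySem.Set.ofList [item]) PySem.Set.empty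

-- sum(int(matrix[y][x]) for x, y in group)
def pvSumGroup (m : List (List Char)) (g : PySem.Set (Int × Int)) : Int :=
  g.foldl (fun s c => s + pvVal m c) 0

-- buttons_2's while loop: pop, flood the group, append its weight, subtract the group
def pvButtonsLoop (m : List (List Char)) (to_visit : PySem.Set (Int × Int))
    (groups : List Int) : List Int :=
  match to_visit with
  | [] => groups
  | c :: rest =>
    pvButtonsLoop m (PySem.Set.diff rest (pvGetGroup m c))
      (groups ++ [pvSumGroup m (pvGetGroup m c)])
termination_by to_visit.length
decreasing_by
  simp only [PySem.Set.diff, List.length_cons]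
  exact Nat.lt_succ_of_le (List.length_filter_le _ _)

def buttons_2 (ceiling : String) : List Int :=
  let m := pvMatrix ceiling
  -- {(x, y) for x in range(width) for y in range(height) if matrix[y][x] != "0"}
  let to_visit : PySem.Set (Int × Int) :=
    PySem.Set.ofList ((PySem.List.pyRange 0 (pvWidth m) 1).flatMap fun x =>
      ((PySem.List.pyRange 0 (pvHeight m) 1).filter fun y => decide (pvCell m x y ≠ '0')).map
        fun y => (x, y))
  PySem.List.sorted (pvButtonsLoop m to_visit []) (fun v => v) true

-- ===== PORT B =====
-- the four candidate neighbours ((cx+1,cy), (cx-1,cy), (cx,cy+1), (cx,cy-1))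
def pvNbrs (x y : Int) : List (Int × Int) := [(x+1,y), (x-1,y), (x,y+1), (x,y-1)]

-- B's inner 'while stack' DFS. The Lean stack keeps its top at the HEAD (Python appends to
-- and pops from the end), so the block of pushed neighbours goes reversed onto the front.
-- Fuel only makes the recursion total; it is never exhausted under the scan's invariant.
def pvDfsLoop (m : List (List Char)) :
    Nat → List (Int × Int) → PySem.Set (Int × Int) → Int → PySem.Set (Int × Int) × Int
  | 0, _, seen, total => (seen, total)
  | fuel + 1, stack, seen, total =>
    match stack with
    | [] => (seen, total)
    | c :: rest =>
      if PySem.Set.contains seen c then pvDfsLoop m fuel rest seen total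
      else
        pvDfsLoop m fuel
          (((pvNbrs c.1 c.2).filter fun n => decide
              (0 ≤ n.1 ∧ n.1 < (pvWidth m : Int) ∧ 0 ≤ n.2 ∧ n.2 < (pvHeight m : Int) ∧
               pvCell m n.1 n.2 ≠ '0' ∧
               ¬ (PySem.Set.contains (PySem.Set.add seen c) n = true))).reverse ++ rest)
          (PySem.Set.add seen c) (total + pvVal m c)

def buttons_2_alt (ceiling : String) : List Int :=
  let m := pvMatrix ceiling
  let r := (PySem.List.pyRange 0 (pvHeight m) 1).foldl
    (fun (st : PySem.Set (Int × Int) × List Int) y =>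
      (PySem.List.pyRange 0 (pvWidth m) 1).foldl
        (fun st x =>
          if pvCell m x y = '0' ∨ PySem.Set.contains st.1 (x, y) = true then st
          else
            let d := pvDfsLoop m (4 * (pvHeight m * pvWidth m) + 2) [(x, y)] st.1 0
            (d.1, st.2 ++ [d.2]))
        st)
    (PySem.Set.empty, [])
  PySem.List.sorted r.2 (fun v => v) true

-- ===== PRECONDITION & SPEC =====
-- Pre_ = exactly the inputs where Python A returns: the stripped non-blank lines are a
-- non-empty list, every line is at least as long as the first (else IndexError), and every
-- cell in the first len(matrix[0]) columns is a decimal digit (else int() raises ValueError).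
def Pre_buttons_2 (ceiling : String) : Prop :=
  pvMatrix ceiling ≠ [] ∧
  ∀ row ∈ pvMatrix ceiling, pvWidth (pvMatrix ceiling) ≤ row.length ∧
    ∀ x < pvWidth (pvMatrix ceiling), PySem.Chars.isdigit (row.getD x '0') = true
instance (ceiling : String) : Decidable (Pre_buttons_2 ceiling) := by
  unfold Pre_buttons_2; infer_instance

def pvWitness_buttons_2 : String := "12\n03"

def Spec_buttons_2 (ceiling : String) (out : List Int) : Prop := out = buttons_2_alt ceiling
instance (ceiling : String) (out : List Int) : Decidable (Spec_buttons_2 ceiling out) := by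
  unfold Spec_buttons_2; infer_instance

-- ===== CLAIM (what is proved, stated in full; the proofs are below) =====
def Claim_equal_buttons_2 : Prop :=
  ∀ (ceiling : String), Dom_buttons_2 ceiling → Pre_buttons_2 ceiling →
    Spec_buttons_2 ceiling (buttons_2 ceiling)

-- ===== LEMMAS AND PROOFS =====

-- abstract grid notions used only by the proofs
def pvInB (m : List (List Char)) (c : Int × Int) : Prop :=
  0 ≤ c.1 ∧ c.1 < (pvWidth m : Int) ∧ 0 ≤ c.2 ∧ c.2 < (pvHeight m : Int)

def pvNZ (m : List (List Char)) (c : Int × Int) : Prop :=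
  pvInB m c ∧ pvCell m c.1 c.2 ≠ '0'

def pvStep (m : List (List Char)) (a b : Int × Int) : Prop :=
  b ∈ pvNbrs a.1 a.2 ∧ pvNZ m b

inductive pvReach (m : List (List Char)) : (Int × Int) → (Int × Int) → Prop
  | refl (c : Int × Int) : pvReach m c c
  | tail {a b c : Int × Int} : pvReach m a b → pvStep m b c → pvReach m a c

-- the canonical component of a cell, and its weight
def pvCompF (m : List (List Char)) (c : Int × Int) : Finset (Int × Int) :=
  (pvGetGroup m c).toFinset

def pvWeightF (m : List (List Char)) (F : Finset (Int × Int)) : Int := F.sum (pvVal m)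

lemma pvNbrs_symm {a b : Int × Int} (h : b ∈ pvNbrs a.1 a.2) : a ∈ pvNbrs b.1 b.2 := by
  rcases a with ⟨ax, ay⟩; rcases b with ⟨bx, by'⟩
  simp only [pvNbrs, List.mem_cons, Prod.mk.injEq, List.not_mem_nil, or_false] at h ⊢
  omega

lemma pvShift_mem_nbrs (c d : Int × Int) (hd : d ∈ pvDeltas) :
    (c.1 + d.1, c.2 + d.2) ∈ pvNbrs c.1 c.2 := by
  rcases d with ⟨dx, dy⟩
  simp only [pvDeltas, List.mem_cons, Prod.mk.injEq, List.not_mem_nil, or_false] at hd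
  simp only [pvNbrs, List.mem_cons, Prod.mk.injEq, List.not_mem_nil, or_false]
  omega

lemma pvNbrs_shift {c b : Int × Int} (h : b ∈ pvNbrs c.1 c.2) :
    ∃ d ∈ pvDeltas, b = (c.1 + d.1, c.2 + d.2) := by
  simp only [pvNbrs, List.mem_cons, List.not_mem_nil, or_false] at h
  rcases h with h | h | h | h
  · exact ⟨(1, 0), by simp [pvDeltas], by rcases b with ⟨bx, by'⟩; simp_all [Prod.ext_iff]⟩
  · exact ⟨(-1, 0), by simp [pvDeltas], by rcases b with ⟨bx, by'⟩; simp_all [Prod.ext_iff]; omega⟩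
  · exact ⟨(0, 1), by simp [pvDeltas], by rcases b with ⟨bx, by'⟩; simp_all [Prod.ext_iff]⟩
  · exact ⟨(0, -1), by simp [pvDeltas], by rcases b with ⟨bx, by'⟩; simp_all [Prod.ext_iff]; omega⟩

lemma pvReach_trans {m : List (List Char)} {a b c : Int × Int}
    (h1 : pvReach m a b) (h2 : pvReach m b c) : pvReach m a c := by
  induction h2 with
  | refl => exact h1
  | tail _ s ih => exact pvReach.tail ih s

lemma pvReach_nz {m : List (List Char)} {a b : Int × Int}
    (ha : pvNZ m a) (h : pvReach m a b) : pvNZ m b := by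
  induction h with
  | refl => exact ha
  | tail _ s _ => exact s.2

lemma pvReach_symm {m : List (List Char)} {a b : Int × Int}
    (ha : pvNZ m a) (h : pvReach m a b) : pvReach m b a := by
  induction h with
  | refl => exact pvReach.refl _
  | tail h s ih =>
    exact pvReach_trans (pvReach.tail (pvReach.refl _) ⟨pvNbrs_symm s.1, pvReach_nz ha h⟩) ih

lemma pvClosed_reach {m : List (List Char)} {P : Int × Int → Prop}
    (hP : ∀ a, P a → ∀ b, pvStep m a b → P b) {a b : Int × Int}
    (ha : P a) (h : pvReach m a b) : P b := by
  induction h with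
  | refl => exact ha
  | tail _ s ih => exact hP _ ih _ s

-- a nodup list of in-bounds cells has at most height*width elements
lemma pvLength_le_cells (m : List (List Char)) (l : List (Int × Int))
    (hnd : l.Nodup) (hb : ∀ c ∈ l, pvInB m c) : l.length ≤ pvHeight m * pvWidth m := by
  classical
  have hsub : l.toFinset ⊆
      (Finset.range (pvWidth m) ×ˢ Finset.range (pvHeight m)).image
        (fun p => ((p.1 : Int), (p.2 : Int))) := by
    intro c hc
    obtain ⟨h1, h2, h3, h4⟩ := hb c (List.mem_toFinset.1 hc)
    rcases c with ⟨cx, cy⟩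
    refine Finset.mem_image.2 ⟨(cx.toNat, cy.toNat), ?_, ?_⟩
    · simp only [Finset.mem_product, Finset.mem_range]; omega
    · simp only [Prod.mk.injEq]; omega
  calc l.length = l.toFinset.card := (List.toFinset_card_of_nodup hnd).symm
    _ ≤ _ := Finset.card_le_card hsub
    _ ≤ (Finset.range (pvWidth m) ×ˢ Finset.range (pvHeight m)).card := Finset.card_image_le
    _ = pvHeight m * pvWidth m := by
        rw [Finset.card_product]; simp [Nat.mul_comm]

lemma pvExpand_mem {m : List (List Char)} (c : Int × Int) (vis tv : PySem.Set (Int × Int))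
    (ds : List (Int × Int)) (x : Int × Int) :
    x ∈ ds.foldl (pvExpStep m c.1 c.2 vis) tv ↔
      x ∈ tv ∨ ∃ d ∈ ds, x = (c.1 + d.1, c.2 + d.2) ∧ pvNZ m x ∧ x ∉ vis := by
  induction ds generalizing tv with
  | nil => simp
  | cons d ds ih =>
    simp only [List.foldl_cons, ih]
    constructor
    · rintro (hx | ⟨e, he, rfl, hnz, hnv⟩)
      · unfold pvExpStep at hx
        split at hx
        · rename_i hcond
          rcases (PySem.Set.mem_add _ _ _).1 hx with hx | rfl
          · exact Or.inl hx
          · refine Or.inr ⟨d, List.mem_cons_self, rfl, ?_, ?_⟩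
            · exact ⟨⟨hcond.2.1.1, hcond.2.1.2, hcond.1.1, hcond.1.2⟩, hcond.2.2.1⟩
            · exact fun hm => hcond.2.2.2 ((PySem.Set.contains_iff _ _).2 hm)
        · exact Or.inl hx
      · exact Or.inr ⟨e, List.mem_cons_of_mem _ he, rfl, hnz, hnv⟩
    · rintro (hx | ⟨e, he, rfl, hnz, hnv⟩)
      · left; unfold pvExpStep; split
        · exact (PySem.Set.mem_add _ _ _).2 (Or.inl hx)
        · exact hx
      · rcases List.mem_cons.1 he with rfl | he
        · left; unfold pvExpStep
          rw [if_pos ⟨⟨hnz.1.2.2.1, hnz.1.2.2.2⟩, ⟨hnz.1.1, hnz.1.2.1⟩, hnz.2,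
            fun hc => hnv ((PySem.Set.contains_iff _ _).1 hc)⟩]
          exact (PySem.Set.mem_add _ _ _).2 (Or.inr rfl)
        · exact Or.inr ⟨e, he, rfl, hnz, hnv⟩

lemma pvExpand_nodup {m : List (List Char)} (c : Int × Int) (vis tv : PySem.Set (Int × Int))
    (ds : List (Int × Int)) (h : tv.Nodup) :
    (ds.foldl (pvExpStep m c.1 c.2 vis) tv).Nodup := by
  induction ds generalizing tv with
  | nil => exact h
  | cons d ds ih =>
    refine ih _ ?_
    unfold pvExpStep
    split
    · exact PySem.Set.nodup_add _ _ h
    · exact h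

-- total-correctness invariant of get_group's while loop
lemma pvGroupLoop_total (m : List (List Char)) :
    ∀ (fuel : Nat) (tv vis : PySem.Set (Int × Int)),
      (vis ++ tv).Nodup →
      (∀ c ∈ tv, pvInB m c) → (∀ c ∈ vis, pvInB m c) →
      (∀ a ∈ vis, ∀ b, pvStep m a b → b ∈ vis ∨ b ∈ tv) →
      pvHeight m * pvWidth m ≤ vis.length + fuel →
      (pvGroupLoop m fuel tv vis).Nodup ∧
      (∀ c ∈ vis, c ∈ pvGroupLoop m fuel tv vis) ∧
      (∀ c ∈ tv, c ∈ pvGroupLoop m fuel tv vis) ∧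
      (∀ c ∈ pvGroupLoop m fuel tv vis, pvInB m c) ∧
      (∀ a ∈ pvGroupLoop m fuel tv vis, ∀ b, pvStep m a b → b ∈ pvGroupLoop m fuel tv vis) := by
  intro fuel
  induction fuel with
  | zero =>
    intro tv vis h1 h2 h3 h4 hf
    rcases tv with _ | ⟨c, rest⟩
    · simp only [pvGroupLoop]
      refine ⟨by simpa using h1, fun c hc => hc, by simp, h3, ?_⟩
      intro a ha b hb
      rcases h4 a ha b hb with h | h
      · exact h
      · simp at h
    · exfalso
      have hb : ∀ z ∈ vis ++ c :: rest, pvInB m z := by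
        intro z hz
        rcases List.mem_append.1 hz with hz | hz
        · exact h3 z hz
        · exact h2 z hz
      have := pvLength_le_cells m _ h1 hb
      simp only [List.length_append, List.length_cons] at this
      omega
  | succ n ih =>
    intro tv vis h1 h2 h3 h4 hf
    rcases tv with _ | ⟨c, rest⟩
    · simp only [pvGroupLoop]
      refine ⟨by simpa using h1, fun c hc => hc, by simp, h3, ?_⟩
      intro a ha b hb
      rcases h4 a ha b hb with h | h
      · exact h
      · simp at h
    · have hndvis : vis.Nodup := (List.nodup_append.1 h1).1
      have hndcr : (c :: rest).Nodup := (List.nodup_append.1 h1).2.1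
      have hdisj : ∀ a ∈ vis, a ∉ c :: rest := by
        intro a ha hb
        exact (List.disjoint_of_nodup_append h1) ha hb
      have hcvis : c ∉ vis := fun hc => hdisj c hc List.mem_cons_self
      have hcrest : c ∉ rest := (List.nodup_cons.1 hndcr).1
      have hndrest : rest.Nodup := (List.nodup_cons.1 hndcr).2
      have hvis' : PySem.Set.add vis c = vis ++ [c] := by
        unfold PySem.Set.add
        rw [if_neg]
        intro hc
        exact hcvis ((PySem.Set.contains_iff _ _).1 hc)
      simp only [pvGroupLoop]
      set tv' := pvDeltas.foldl (pvExpStep m c.1 c.2 (PySem.Set.add vis c)) rest with htv'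
      have hmemtv' : ∀ x, x ∈ tv' ↔
          x ∈ rest ∨ ∃ d ∈ pvDeltas, x = (c.1 + d.1, c.2 + d.2) ∧ pvNZ m x ∧
            x ∉ PySem.Set.add vis c :=
        fun x => pvExpand_mem c (PySem.Set.add vis c) rest pvDeltas x
      have hrest_sub : ∀ x ∈ rest, x ∈ tv' := fun x hx => (hmemtv' x).2 (Or.inl hx)
      have h1' : (PySem.Set.add vis c ++ tv').Nodup := by
        rw [List.nodup_append]
        refine ⟨by
          rw [hvis', List.nodup_append]
          refine ⟨hndvis, by simp, ?_⟩
          intro a ha b hb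
          simp only [List.mem_singleton] at hb
          subst hb
          exact fun h => hcvis (h ▸ ha), pvExpand_nodup c _ rest pvDeltas hndrest, ?_⟩
        intro a ha b hb
        rintro rfl
        rcases (hmemtv' a).1 hb with h | ⟨d, _, _, _, hnv⟩
        · rw [hvis'] at ha
          rcases List.mem_append.1 ha with ha | ha
          · exact hdisj a ha (List.mem_cons_of_mem _ h)
          · simp only [List.mem_singleton] at ha
            exact hcrest (ha ▸ h)
        · exact hnv ha
      have h2' : ∀ z ∈ tv', pvInB m z := by
        intro z hz
        rcases (hmemtv' z).1 hz with h | ⟨d, _, _, hnz, _⟩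
        · exact h2 z (List.mem_cons_of_mem _ h)
        · exact hnz.1
      have h3' : ∀ z ∈ PySem.Set.add vis c, pvInB m z := by
        rw [hvis']
        intro z hz
        rcases List.mem_append.1 hz with hz | hz
        · exact h3 z hz
        · simp only [List.mem_singleton] at hz
          subst hz
          exact h2 _ List.mem_cons_self
      have h4' : ∀ a ∈ PySem.Set.add vis c, ∀ b, pvStep m a b →
          b ∈ PySem.Set.add vis c ∨ b ∈ tv' := by
        intro a ha b hb
        rw [hvis'] at ha
        rcases List.mem_append.1 ha with ha | ha
        · rcases h4 a ha b hb with h | h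
          · left
            rw [hvis']
            exact List.mem_append.2 (Or.inl h)
          · rcases List.mem_cons.1 h with rfl | h
            · left
              rw [hvis']
              exact List.mem_append.2 (Or.inr (List.mem_singleton.2 rfl))
            · exact Or.inr (hrest_sub b h)
        · simp only [List.mem_singleton] at ha
          subst ha
          by_cases hbv : b ∈ PySem.Set.add vis a
          · exact Or.inl hbv
          · obtain ⟨d, hd, rfl⟩ := pvNbrs_shift hb.1
            exact Or.inr ((hmemtv' _).2 (Or.inr ⟨d, hd, rfl, hb.2, hbv⟩))
      have hf' : pvHeight m * pvWidth m ≤ (PySem.Set.add vis c).length + n := by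
        rw [hvis']
        simp only [List.length_append, List.length_cons, List.length_nil]
        omega
      obtain ⟨cnd, cvs, ctv, cinB, ccl⟩ := ih tv' (PySem.Set.add vis c) h1' h2' h3' h4' hf'
      refine ⟨cnd, ?_, ?_, cinB, ccl⟩
      · intro z hz
        refine cvs z ?_
        rw [hvis']
        exact List.mem_append.2 (Or.inl hz)
      · intro z hz
        rcases List.mem_cons.1 hz with rfl | hz
        · refine cvs z ?_
          rw [hvis']
          exact List.mem_append.2 (Or.inr (List.mem_singleton.2 rfl))
        · exact ctv z (hrest_sub z hz)

lemma pvGroupLoop_sound (m : List (List Char)) (R : Int × Int → Prop)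
    (hR : ∀ a, R a → ∀ b, pvStep m a b → R b) :
    ∀ (fuel : Nat) (tv vis : PySem.Set (Int × Int)),
      (∀ c ∈ tv, R c) → (∀ c ∈ vis, R c) →
      ∀ c ∈ pvGroupLoop m fuel tv vis, R c := by
  intro fuel
  induction fuel with
  | zero =>
    intro tv vis _ hvis c hc
    exact hvis c hc
  | succ n ih =>
    intro tv vis htv hvis
    rcases tv with _ | ⟨c, rest⟩
    · intro z hz
      exact hvis z hz
    · simp only [pvGroupLoop]
      refine ih _ _ ?_ ?_
      · intro z hz
        rcases (pvExpand_mem c (PySem.Set.add vis c) rest pvDeltas z).1 hz with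
          h | ⟨d, hd, rfl, hnz, _⟩
        · exact htv z (List.mem_cons_of_mem _ h)
        · exact hR c (htv c List.mem_cons_self) _ ⟨pvShift_mem_nbrs c d hd, hnz⟩
      · intro z hz
        rcases (PySem.Set.mem_add _ _ _).1 hz with h | rfl
        · exact hvis z h
        · exact htv z List.mem_cons_self

lemma pvGetGroup_spec (m : List (List Char)) (r : Int × Int) (hr : pvNZ m r) :
    (pvGetGroup m r).Nodup ∧ ∀ c, c ∈ pvGetGroup m r ↔ pvReach m r c := by
  have h0 : (PySem.Set.ofList [r] : PySem.Set (Int × Int)) = [r] := by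
    simp [PySem.Set.ofList, PySem.Set.add, PySem.Set.empty, PySem.Set.contains]
  unfold pvGetGroup
  rw [h0]
  obtain ⟨cnd, cvs, ctv, cinB, ccl⟩ := pvGroupLoop_total m (pvHeight m * pvWidth m + 1) [r] []
    (by simp) (by intro z hz; simp only [List.mem_singleton] at hz; subst hz; exact hr.1)
    (by simp) (by simp) (by simp)
  refine ⟨cnd, fun c => ⟨?_, ?_⟩⟩
  · intro hc
    refine pvGroupLoop_sound m (pvReach m r) (fun a ha b hb => pvReach.tail ha hb) _ [r] []
      ?_ (by simp) c hc
    intro z hz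
    simp only [List.mem_singleton] at hz
    subst hz
    exact pvReach.refl _
  · intro hc
    exact pvClosed_reach ccl (ctv r List.mem_cons_self) hc

lemma pvMem_compF {m : List (List Char)} {r : Int × Int} (hr : pvNZ m r) (c : Int × Int) :
    c ∈ pvCompF m r ↔ pvReach m r c := by
  rw [pvCompF, List.mem_toFinset]
  exact (pvGetGroup_spec m r hr).2 c

lemma pvCompF_eq_of_reach {m : List (List Char)} {c d : Int × Int}
    (hc : pvNZ m c) (h : pvReach m c d) : pvCompF m c = pvCompF m d := by
  have hd := pvReach_nz hc h
  ext z
  rw [pvMem_compF hc, pvMem_compF hd]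
  exact ⟨fun hz => pvReach_trans (pvReach_symm hc h) hz, fun hz => pvReach_trans h hz⟩

lemma pvReach_of_compF_eq {m : List (List Char)} {c d : Int × Int}
    (hc : pvNZ m c) (hd : pvNZ m d) (h : pvCompF m c = pvCompF m d) : pvReach m c d := by
  have : d ∈ pvCompF m d := (pvMem_compF hd d).2 (pvReach.refl d)
  rw [← h] at this
  exact (pvMem_compF hc d).1 this

lemma pvSumGroup_eq {m : List (List Char)} {r : Int × Int} (hr : pvNZ m r) :
    pvSumGroup m (pvGetGroup m r) = pvWeightF m (pvCompF m r) := by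
  obtain ⟨nd, _⟩ := pvGetGroup_spec m r hr
  unfold pvSumGroup pvWeightF pvCompF
  rw [PySem.List.foldl_add, List.sum_toFinset _ nd, zero_add]

-- A's outer loop returns the weights of the distinct components of to_visit
lemma pvButtonsLoop_spec (m : List (List Char)) :
    ∀ (n : Nat) (tv : PySem.Set (Int × Int)) (groups : List Int),
      tv.length ≤ n → tv.Nodup → (∀ c ∈ tv, pvNZ m c) →
      (∀ c ∈ tv, ∀ d, pvReach m c d → d ∈ tv) →
      ∃ cs : List (Finset (Int × Int)),
        pvButtonsLoop m tv groups = groups ++ cs.map (pvWeightF m) ∧ cs.Nodup ∧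
        ∀ F, F ∈ cs ↔ ∃ c ∈ tv, F = pvCompF m c := by
  intro n
  induction n with
  | zero =>
    intro tv groups hlen _ _ _
    have htv : tv = [] := List.length_eq_zero_iff.1 (Nat.le_zero.1 hlen)
    subst htv
    exact ⟨[], by simp [pvButtonsLoop], by simp, by simp⟩
  | succ n ih =>
    intro tv groups hlen hnd hnz hcl
    rcases tv with _ | ⟨c, rest⟩
    · exact ⟨[], by simp [pvButtonsLoop], by simp, by simp⟩
    · have hc : pvNZ m c := hnz c List.mem_cons_self
      obtain ⟨gnd, gmem⟩ := pvGetGroup_spec m c hc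
      rw [pvButtonsLoop]
      have hmemtv' : ∀ z, z ∈ PySem.Set.diff rest (pvGetGroup m c) ↔
          z ∈ rest ∧ ¬ pvReach m c z := by
        intro z
        simp only [PySem.Set.diff, List.mem_filter, Bool.not_eq_eq_eq_not, Bool.not_true,
          ← Bool.not_eq_true, PySem.Set.contains_iff]
        rw [gmem]
      have hndrest : rest.Nodup := (List.nodup_cons.1 hnd).2
      have hcrest : c ∉ rest := (List.nodup_cons.1 hnd).1
      obtain ⟨cs', heq', hnd', hmem'⟩ := ih (PySem.Set.diff rest (pvGetGroup m c))
        (groups ++ [pvSumGroup m (pvGetGroup m c)])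
        (le_trans (List.length_filter_le _ _) (Nat.succ_le_succ_iff.1 hlen))
        (List.Nodup.filter _ hndrest)
        (by
          intro z hz
          exact hnz z (List.mem_cons_of_mem _ ((hmemtv' z).1 hz).1))
        (by
          intro z hz d hd
          obtain ⟨hzr, hznr⟩ := (hmemtv' z).1 hz
          have hznz : pvNZ m z := hnz z (List.mem_cons_of_mem _ hzr)
          have hdtv : d ∈ c :: rest := hcl z (List.mem_cons_of_mem _ hzr) d hd
          have hdnr : ¬ pvReach m c d := by
            intro hcd
            exact hznr (pvReach_trans hcd (pvReach_symm hznz hd))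
          rcases List.mem_cons.1 hdtv with rfl | hdr
          · exact absurd (pvReach.refl d) hdnr
          · exact (hmemtv' d).2 ⟨hdr, hdnr⟩)
      refine ⟨pvCompF m c :: cs', ?_, ?_, ?_⟩
      · rw [heq', pvSumGroup_eq hc]
        simp
      · rw [List.nodup_cons]
        refine ⟨?_, hnd'⟩
        intro hmemc
        obtain ⟨z, hz, hez⟩ := (hmem' _).1 hmemc
        have hznz : pvNZ m z := hnz z (List.mem_cons_of_mem _ ((hmemtv' z).1 hz).1)
        exact ((hmemtv' z).1 hz).2 (pvReach_of_compF_eq hc hznz hez)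
      · intro F
        simp only [List.mem_cons]
        constructor
        · rintro (rfl | hF)
          · exact ⟨c, by simp, rfl⟩
          · obtain ⟨z, hz, hez⟩ := (hmem' F).1 hF
            exact ⟨z, by simp [((hmemtv' z).1 hz).1], hez⟩
        · rintro ⟨z, hz, rfl⟩
          rcases hz with rfl | hzr
          · exact Or.inl rfl
          · by_cases hrz : pvReach m c z
            · exact Or.inl (pvCompF_eq_of_reach hc hrz).symm
            · exact Or.inr ((hmem' _).2 ⟨z, (hmemtv' z).2 ⟨hzr, hrz⟩, rfl⟩)

-- B's DFS: starting from stack/seen it returns seen ++ new with the weight of new added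
lemma pvDfsLoop_total (m : List (List Char)) (O : PySem.Set (Int × Int))
    (_hO : ∀ a ∈ O, ∀ b, pvStep m a b → b ∈ O) :
    ∀ (fuel : Nat) (stack : List (Int × Int)) (seen : PySem.Set (Int × Int)) (total : Int),
      (∀ c ∈ O, c ∈ seen) → seen.Nodup → (∀ c ∈ seen, pvInB m c) →
      (∀ c ∈ stack, pvNZ m c) →
      (∀ a ∈ seen, a ∉ O → ∀ b, pvStep m a b → b ∈ seen ∨ b ∈ stack) →
      stack.length + 4 * (pvHeight m * pvWidth m - seen.length) ≤ fuel →
      ∃ new : List (Int × Int),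
        pvDfsLoop m fuel stack seen total = (seen ++ new, total + (new.map (pvVal m)).sum) ∧
        (seen ++ new).Nodup ∧ (∀ c ∈ new, pvNZ m c) ∧
        (∀ c ∈ stack, c ∈ seen ++ new) ∧
        (∀ a ∈ seen ++ new, a ∉ O → ∀ b, pvStep m a b → b ∈ seen ++ new) := by
  intro fuel
  induction fuel with
  | zero =>
    intro stack seen total hOs hnd hsb hst hcl hf
    have hs0 : stack = [] := List.length_eq_zero_iff.1 (by omega)
    subst hs0
    refine ⟨[], by simp [pvDfsLoop], by simpa using hnd, by simp, by simp, ?_⟩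
    intro a ha haO b hb
    rcases hcl a (by simpa using ha) haO b hb with h | h
    · simpa using h
    · simp at h
  | succ fuel ih =>
    intro stack seen total hOs hnd hsb hst hcl hf
    rcases stack with _ | ⟨c, rest⟩
    · refine ⟨[], by simp [pvDfsLoop], by simpa using hnd, by simp, by simp, ?_⟩
      intro a ha haO b hb
      rcases hcl a (by simpa using ha) haO b hb with h | h
      · simpa using h
      · simp at h
    · simp only [pvDfsLoop, List.length_cons] at hf ⊢
      by_cases hcs : PySem.Set.contains seen c = true
      · rw [if_pos hcs]
        have hcmem : c ∈ seen := (PySem.Set.contains_iff _ _).1 hcs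
        obtain ⟨new, heq, hnd', hnz', hstk', hcl'⟩ := ih rest seen total hOs hnd hsb
          (fun z hz => hst z (List.mem_cons_of_mem _ hz))
          (by
            intro a ha haO b hb
            rcases hcl a ha haO b hb with h | h
            · exact Or.inl h
            · rcases List.mem_cons.1 h with rfl | h
              · exact Or.inl hcmem
              · exact Or.inr h)
          (by omega)
        refine ⟨new, heq, hnd', hnz', ?_, hcl'⟩
        intro z hz
        rcases List.mem_cons.1 hz with rfl | hz
        · exact List.mem_append.2 (Or.inl hcmem)
        · exact hstk' z hz
      · rw [if_neg hcs]
        have hcm : c ∉ seen := fun h => hcs ((PySem.Set.contains_iff _ _).2 h)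
        have hvis' : PySem.Set.add seen c = seen ++ [c] := by
          unfold PySem.Set.add
          rw [if_neg hcs]
        have hcnz : pvNZ m c := hst c List.mem_cons_self
        set flt := (pvNbrs c.1 c.2).filter (fun n => decide
            (0 ≤ n.1 ∧ n.1 < (pvWidth m : Int) ∧ 0 ≤ n.2 ∧ n.2 < (pvHeight m : Int) ∧
             pvCell m n.1 n.2 ≠ '0' ∧
             ¬ (PySem.Set.contains (PySem.Set.add seen c) n = true))) with hflt
        have hfltmem : ∀ z ∈ flt, pvNZ m z ∧ z ∈ pvNbrs c.1 c.2 ∧ z ∉ seen ++ [c] := by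
          intro z hz
          rw [hflt, List.mem_filter] at hz
          obtain ⟨hz1, hz2⟩ := hz
          rw [decide_eq_true_iff] at hz2
          refine ⟨⟨⟨hz2.1, hz2.2.1, hz2.2.2.1, hz2.2.2.2.1⟩, hz2.2.2.2.2.1⟩, hz1, ?_⟩
          intro hmem
          rw [← hvis'] at hmem
          exact hz2.2.2.2.2.2 ((PySem.Set.contains_iff _ _).2 hmem)
        have hseen1 : ∀ z ∈ seen ++ [c], pvInB m z := by
          intro z hz
          rcases List.mem_append.1 hz with hz | hz
          · exact hsb z hz
          · simp only [List.mem_singleton] at hz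
            subst hz
            exact hcnz.1
        have hndseen' : (seen ++ [c]).Nodup := by
          rw [List.nodup_append]
          refine ⟨hnd, by simp, ?_⟩
          intro a ha b hb
          simp only [List.mem_singleton] at hb
          subst hb
          exact fun h => hcm (h ▸ ha)
        have hlenb : seen.length + 1 ≤ pvHeight m * pvWidth m := by
          have := pvLength_le_cells m _ hndseen' hseen1
          simpa using this
        obtain ⟨new', heq', hnd', hnz', hstk', hcl'⟩ := ih (flt.reverse ++ rest)
          (PySem.Set.add seen c) (total + pvVal m c)
          (by
            rw [hvis']
            intro z hz
            exact List.mem_append.2 (Or.inl (hOs z hz)))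
          (by rw [hvis']; exact hndseen')
          (by rw [hvis']; exact hseen1)
          (by
            intro z hz
            rcases List.mem_append.1 hz with hz | hz
            · exact (hfltmem z (List.mem_reverse.1 hz)).1
            · exact hst z (List.mem_cons_of_mem _ hz))
          (by
            intro a ha haO b hb
            rw [hvis'] at ha
            rcases List.mem_append.1 ha with ha | ha
            · rcases hcl a ha haO b hb with h | h
              · rw [hvis']
                exact Or.inl (List.mem_append.2 (Or.inl h))
              · rcases List.mem_cons.1 h with rfl | h
                · rw [hvis']
                  exact Or.inl (List.mem_append.2 (Or.inr (List.mem_singleton.2 rfl)))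
                · exact Or.inr (List.mem_append.2 (Or.inr h))
            · simp only [List.mem_singleton] at ha
              subst ha
              by_cases hbv : b ∈ PySem.Set.add seen a
              · exact Or.inl hbv
              · refine Or.inr (List.mem_append.2 (Or.inl (List.mem_reverse.2 ?_)))
                rw [hflt, List.mem_filter, decide_eq_true_iff]
                refine ⟨hb.1, hb.2.1.1, hb.2.1.2.1, hb.2.1.2.2.1, hb.2.1.2.2.2, hb.2.2, ?_⟩
                intro hcb
                exact hbv ((PySem.Set.contains_iff _ _).1 hcb))
          (by
            have hfl : flt.length ≤ 4 := by
              calc flt.length ≤ (pvNbrs c.1 c.2).length := List.length_filter_le _ _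
                _ = 4 := by simp [pvNbrs]
            have h2 : (PySem.Set.add seen c).length = seen.length + 1 := by
              rw [hvis']
              simp
            rw [h2]
            simp only [List.length_append, List.length_reverse]
            omega)
        refine ⟨c :: new', ?_, ?_, ?_, ?_, ?_⟩
        · rw [heq', hvis', List.append_assoc, List.singleton_append, List.map_cons,
            List.sum_cons, ← add_assoc]
        · rw [hvis', List.append_assoc] at hnd'
          simpa using hnd'
        · intro z hz
          rcases List.mem_cons.1 hz with rfl | hz
          · exact hcnz
          · exact hnz' z hz
        · have hsub : ∀ w ∈ PySem.Set.add seen c ++ new', w ∈ seen ++ c :: new' := by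
            intro w hw
            rw [hvis', List.append_assoc] at hw
            simpa using hw
          intro z hz
          rcases List.mem_cons.1 hz with rfl | hz
          · exact List.mem_append.2 (Or.inr List.mem_cons_self)
          · exact hsub z (hstk' z (List.mem_append.2 (Or.inr hz)))
        · have hiff : ∀ w, w ∈ PySem.Set.add seen c ++ new' ↔ w ∈ seen ++ c :: new' := by
            intro w
            rw [hvis', List.append_assoc]
            simp
          intro a ha haO b hb
          rw [← hiff]
          exact hcl' a ((hiff a).2 ha) haO b hb

lemma pvDfsLoop_sound (m : List (List Char)) (P R : Int × Int → Prop)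
    (hR : ∀ a, R a → ∀ b, pvStep m a b → R b) :
    ∀ (fuel : Nat) (stack : List (Int × Int)) (seen : PySem.Set (Int × Int)) (total : Int),
      (∀ c ∈ stack, R c) → (∀ c ∈ seen, P c ∨ R c) →
      ∀ c ∈ (pvDfsLoop m fuel stack seen total).1, P c ∨ R c := by
  intro fuel
  induction fuel with
  | zero =>
    intro stack seen total _ hs c hc
    exact hs c hc
  | succ fuel ih =>
    intro stack seen total hst hs
    rcases stack with _ | ⟨c, rest⟩
    · intro z hz
      exact hs z hz
    · simp only [pvDfsLoop]
      by_cases hcs : PySem.Set.contains seen c = true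
      · rw [if_pos hcs]
        exact ih rest seen total (fun z hz => hst z (List.mem_cons_of_mem _ hz)) hs
      · rw [if_neg hcs]
        refine ih _ _ _ ?_ ?_
        · intro z hz
          rcases List.mem_append.1 hz with hz | hz
          · have hz' := List.mem_reverse.1 hz
            rw [List.mem_filter, decide_eq_true_iff] at hz'
            exact hR c (hst c List.mem_cons_self) z
              ⟨hz'.1, ⟨hz'.2.1, hz'.2.2.1, hz'.2.2.2.1, hz'.2.2.2.2.1⟩, hz'.2.2.2.2.2.1⟩
          · exact hst z (List.mem_cons_of_mem _ hz)
        · intro z hz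
          rcases (PySem.Set.mem_add _ _ _).1 hz with hz | rfl
          · exact hs z hz
          · exact Or.inr (hst z List.mem_cons_self)

lemma pvFoldl_foldl {σ : Type} (f : σ → Int → Int → σ) (ys xs : List Int) (init : σ) :
    ys.foldl (fun st y => xs.foldl (fun st x => f st y x) st) init =
      (ys.flatMap fun y => xs.map fun x => ((x : Int), y)).foldl (fun st p => f st p.2 p.1) init := by
  induction ys generalizing init with
  | nil => rfl
  | cons y ys ih =>
    simp only [List.flatMap_cons, List.foldl_append, List.foldl_cons, List.foldl_map]
    exact ih _

-- B's scan invariant (pvScanStep names the body of B's nested scan loop, for the proofs)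
def pvScanStep (m : List (List Char)) (st : PySem.Set (Int × Int) × List Int)
    (p : Int × Int) : PySem.Set (Int × Int) × List Int :=
  if pvCell m p.1 p.2 = '0' ∨ PySem.Set.contains st.1 (p.1, p.2) = true then st
  else
    let d := pvDfsLoop m (4 * (pvHeight m * pvWidth m) + 2) [(p.1, p.2)] st.1 0
    (d.1, st.2 ++ [d.2])

lemma pvScan_spec (m : List (List Char)) :
    ∀ (ps : List (Int × Int)) (seen : PySem.Set (Int × Int)) (ws : List Int),
      (∀ p ∈ ps, pvInB m p) →
      seen.Nodup → (∀ c ∈ seen, pvNZ m c) →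
      (∀ a ∈ seen, ∀ b, pvStep m a b → b ∈ seen) →
      (∃ cs : List (Finset (Int × Int)), ws = cs.map (pvWeightF m) ∧ cs.Nodup ∧
        ∀ F, F ∈ cs ↔ ∃ c ∈ seen, F = pvCompF m c) →
      (ps.foldl (pvScanStep m) (seen, ws)).1.Nodup ∧
      (∀ c ∈ (ps.foldl (pvScanStep m) (seen, ws)).1, pvNZ m c) ∧
      (∀ a ∈ (ps.foldl (pvScanStep m) (seen, ws)).1, ∀ b, pvStep m a b →
        b ∈ (ps.foldl (pvScanStep m) (seen, ws)).1) ∧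
      (∀ c ∈ seen, c ∈ (ps.foldl (pvScanStep m) (seen, ws)).1) ∧
      (∀ p ∈ ps, pvNZ m p → p ∈ (ps.foldl (pvScanStep m) (seen, ws)).1) ∧
      (∃ cs : List (Finset (Int × Int)),
        (ps.foldl (pvScanStep m) (seen, ws)).2 = cs.map (pvWeightF m) ∧ cs.Nodup ∧
        ∀ F, F ∈ cs ↔ ∃ c ∈ (ps.foldl (pvScanStep m) (seen, ws)).1, F = pvCompF m c) := by
  intro ps
  induction ps with
  | nil =>
    intro seen ws hps hnd hnz hcl hcs
    simp only [List.foldl_nil]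
    exact ⟨hnd, hnz, hcl, fun c hc => hc, by simp, hcs⟩
  | cons p ps ih =>
    intro seen ws hps hnd hnz hcl hcs
    simp only [List.foldl_cons]
    by_cases h0 : pvCell m p.1 p.2 = '0' ∨ PySem.Set.contains seen (p.1, p.2) = true
    · have hstep : pvScanStep m (seen, ws) p = (seen, ws) := by
        simp only [pvScanStep]
        rw [if_pos h0]
      rw [hstep]
      obtain ⟨C1, C2, C3, C4, C5, C6⟩ := ih seen ws
        (fun q hq => hps q (List.mem_cons_of_mem _ hq)) hnd hnz hcl hcs
      refine ⟨C1, C2, C3, C4, ?_, C6⟩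
      intro q hq hqnz
      rcases List.mem_cons.1 hq with rfl | hq
      · rcases h0 with h0 | h0
        · exact absurd h0 hqnz.2
        · exact C4 q (by simpa using (PySem.Set.contains_iff _ _).1 h0)
      · exact C5 q hq hqnz
    · rw [not_or] at h0
      obtain ⟨hc0, hcont⟩ := h0
      have hpin : pvInB m p := hps p List.mem_cons_self
      have hpnz : pvNZ m p := ⟨hpin, hc0⟩
      have hpseen : p ∉ seen := fun h => hcont (by
        rw [PySem.Set.contains_iff]
        simpa using h)
      obtain ⟨new, heq, hnd2, hnz2, hstk2, hcl2⟩ := pvDfsLoop_total m seen hcl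
        (4 * (pvHeight m * pvWidth m) + 2) [(p.1, p.2)] seen 0
        (fun z hz => hz) hnd (fun z hz => (hnz z hz).1)
        (by
          intro z hz
          simp only [List.mem_singleton] at hz
          subst hz
          exact hpnz)
        (fun a ha haO => absurd ha haO)
        (by
          simp only [List.length_cons, List.length_nil]
          omega)
      have hstep : pvScanStep m (seen, ws) p =
          (seen ++ new, ws ++ [0 + (new.map (pvVal m)).sum]) := by
        simp only [pvScanStep]
        rw [if_neg (by rw [not_or]; exact ⟨hc0, hcont⟩), heq]
      rw [hstep]
      have havoid : ∀ z, pvReach m p z → z ∉ seen := by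
        intro z hz hzseen
        exact hpseen (pvClosed_reach hcl hzseen (pvReach_symm hpnz hz))
      have hpS : p ∈ seen ++ new := by simpa using hstk2 (p.1, p.2) List.mem_cons_self
      have hnewmem : ∀ z, z ∈ new ↔ pvReach m p z := by
        intro z
        constructor
        · intro hz
          have hzS : z ∈ (pvDfsLoop m (4 * (pvHeight m * pvWidth m) + 2)
              [(p.1, p.2)] seen 0).1 := by
            rw [heq]
            exact List.mem_append.2 (Or.inr hz)
          rcases pvDfsLoop_sound m (· ∈ seen) (pvReach m p)
              (fun a ha b hb => pvReach.tail ha hb)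
              (4 * (pvHeight m * pvWidth m) + 2) [(p.1, p.2)] seen 0
              (by
                intro w hw
                simp only [List.mem_singleton] at hw
                subst hw
                exact pvReach.refl _)
              (fun w hw => Or.inl hw) z hzS with h | h
          · exact absurd h (List.disjoint_right.1 (List.disjoint_of_nodup_append hnd2) hz)
          · exact h
        · intro hz
          have hzS : z ∈ seen ++ new := by
            refine (pvClosed_reach (P := fun w => w ∈ seen ++ new ∧ pvReach m p w) ?_
              ⟨hpS, pvReach.refl p⟩ hz).1
            intro a ha b hb
            exact ⟨hcl2 a ha.1 (havoid a ha.2) b hb, pvReach.tail ha.2 hb⟩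
          rcases List.mem_append.1 hzS with h | h
          · exact absurd h (havoid z hz)
          · exact h
      have hndnew : new.Nodup := (List.nodup_append.1 hnd2).2.1
      have htF : new.toFinset = pvCompF m p := by
        ext z
        rw [List.mem_toFinset, hnewmem, pvMem_compF hpnz]
      have hwt : 0 + (new.map (pvVal m)).sum = pvWeightF m (pvCompF m p) := by
        rw [zero_add, pvWeightF, ← htF, List.sum_toFinset _ hndnew]
      have hnzS : ∀ c ∈ seen ++ new, pvNZ m c := by
        intro z hz
        rcases List.mem_append.1 hz with h | h
        · exact hnz z h
        · exact hnz2 z h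
      have hclS : ∀ a ∈ seen ++ new, ∀ b, pvStep m a b → b ∈ seen ++ new := by
        intro a ha b hb
        by_cases haseen : a ∈ seen
        · exact List.mem_append.2 (Or.inl (hcl a haseen b hb))
        · exact hcl2 a ha haseen b hb
      obtain ⟨cs, hws, hcsnd, hcsmem⟩ := hcs
      have hnew_cs : ∃ cs' : List (Finset (Int × Int)),
          ws ++ [0 + (new.map (pvVal m)).sum] = cs'.map (pvWeightF m) ∧ cs'.Nodup ∧
          ∀ F, F ∈ cs' ↔ ∃ c ∈ seen ++ new, F = pvCompF m c := by
        refine ⟨cs ++ [pvCompF m p], by rw [hws, hwt]; simp, ?_, ?_⟩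
        · rw [List.nodup_append]
          refine ⟨hcsnd, by simp, ?_⟩
          intro F hF G hG
          simp only [List.mem_singleton] at hG
          subst hG
          rintro rfl
          obtain ⟨c, hcse, hceq⟩ := (hcsmem _).1 hF
          exact hpseen
            (pvClosed_reach hcl hcse (pvReach_of_compF_eq (hnz c hcse) hpnz hceq.symm))
        · intro F
          simp only [List.mem_append, List.mem_singleton]
          constructor
          · rintro (hF | rfl)
            · obtain ⟨c, hcse, hceq⟩ := (hcsmem F).1 hF
              exact ⟨c, Or.inl hcse, hceq⟩
            · exact ⟨p, List.mem_append.1 hpS, rfl⟩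
          · rintro ⟨c, hcS, rfl⟩
            rcases hcS with h | h
            · exact Or.inl ((hcsmem _).2 ⟨c, h, rfl⟩)
            · exact Or.inr (pvCompF_eq_of_reach hpnz ((hnewmem c).1 h)).symm
      obtain ⟨C1, C2, C3, C4, C5, C6⟩ := ih (seen ++ new)
        (ws ++ [0 + (new.map (pvVal m)).sum])
        (fun q hq => hps q (List.mem_cons_of_mem _ hq)) hnd2 hnzS hclS hnew_cs
      refine ⟨C1, C2, C3, ?_, ?_, C6⟩
      · intro z hz
        exact C4 z (List.mem_append.2 (Or.inl hz))
      · intro q hq hqnz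
        rcases List.mem_cons.1 hq with rfl | hq
        · exact C4 q hpS
        · exact C5 q hq hqnz

lemma pvSorted_rev_congr (xs ys : List Int) (h : xs.Perm ys) :
    PySem.List.sorted xs (fun v => v) true = PySem.List.sorted ys (fun v => v) true := by
  refine List.Perm.eq_of_pairwise (le := fun a b : Int => b ≤ a) ?_ ?_ ?_ ?_
  · intro a b _ _ h1 h2
    omega
  · exact PySem.List.sorted_pairwise_rev xs (fun v => v)
  · exact PySem.List.sorted_pairwise_rev ys (fun v => v)
  · exact ((PySem.List.sorted_perm xs (fun v => v) true).trans h).trans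
      (PySem.List.sorted_perm ys (fun v => v) true).symm

-- ===== VERDICT (by name: the statement is the Claim_ definition above) =====
theorem buttons_2_spec : Claim_equal_buttons_2 := by
  intro ceiling _ _
  unfold Spec_buttons_2
  simp only [buttons_2, buttons_2_alt]
  set m := pvMatrix ceiling with hm
  -- A's initial to_visit holds exactly the non-zero cells
  set L0 := ((PySem.List.pyRange 0 (pvWidth m) 1).flatMap fun x =>
      ((PySem.List.pyRange 0 (pvHeight m) 1).filter fun y => decide (pvCell m x y ≠ '0')).map
        fun y => (x, y)) with hL0
  have hL0mem : ∀ c : Int × Int, c ∈ L0 ↔ pvNZ m c := by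
    rintro ⟨cx, cy⟩
    simp only [hL0, List.mem_flatMap, List.mem_map, List.mem_filter,
      PySem.List.mem_pyRange_one, decide_eq_true_iff, Prod.mk.injEq]
    constructor
    · rintro ⟨x, hx, y, ⟨⟨hy, hcell⟩, rfl, rfl⟩⟩
      exact ⟨⟨hx.1, hx.2, hy.1, hy.2⟩, hcell⟩
    · rintro ⟨⟨h1, h2, h3, h4⟩, hcell⟩
      exact ⟨cx, ⟨h1, h2⟩, cy, ⟨⟨h3, h4⟩, hcell⟩, rfl, rfl⟩
  have htv0 : ∀ c : Int × Int, c ∈ PySem.Set.ofList L0 ↔ pvNZ m c := by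
    intro c
    rw [PySem.Set.mem_ofList]
    exact hL0mem c
  obtain ⟨csA, hAeq, hAnd, hAmem⟩ := pvButtonsLoop_spec m (PySem.Set.ofList L0).length
    (PySem.Set.ofList L0) [] le_rfl (PySem.Set.nodup_ofList L0) (fun c hc => (htv0 c).1 hc)
    (fun c hc d hd => (htv0 d).2 (pvReach_nz ((htv0 c).1 hc) hd))
  -- B's nested scan is a fold of pvScanStep over all grid positions
  have hflat : (PySem.List.pyRange 0 (pvHeight m) 1).foldl
      (fun (st : PySem.Set (Int × Int) × List Int) y =>
        (PySem.List.pyRange 0 (pvWidth m) 1).foldl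
          (fun st x =>
            if pvCell m x y = '0' ∨ PySem.Set.contains st.1 (x, y) = true then st
            else
              let d := pvDfsLoop m (4 * (pvHeight m * pvWidth m) + 2) [(x, y)] st.1 0
              (d.1, st.2 ++ [d.2]))
          st)
      (PySem.Set.empty, []) =
      ((PySem.List.pyRange 0 (pvHeight m) 1).flatMap fun y =>
        (PySem.List.pyRange 0 (pvWidth m) 1).map fun x => ((x : Int), y)).foldl
        (pvScanStep m) (PySem.Set.empty, []) :=
    pvFoldl_foldl
      (fun st y x =>
        if pvCell m x y = '0' ∨ PySem.Set.contains st.1 (x, y) = true then st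
        else
          let d := pvDfsLoop m (4 * (pvHeight m * pvWidth m) + 2) [(x, y)] st.1 0
          (d.1, st.2 ++ [d.2]))
      (PySem.List.pyRange 0 (pvHeight m) 1) (PySem.List.pyRange 0 (pvWidth m) 1)
      (PySem.Set.empty, [])
  rw [hflat]
  set ps := ((PySem.List.pyRange 0 (pvHeight m) 1).flatMap fun y =>
    (PySem.List.pyRange 0 (pvWidth m) 1).map fun x => ((x : Int), y)) with hps
  have hpsmem : ∀ c : Int × Int, c ∈ ps ↔ pvInB m c := by
    rintro ⟨cx, cy⟩
    simp only [hps, List.mem_flatMap, List.mem_map, PySem.List.mem_pyRange_one,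
      Prod.mk.injEq]
    constructor
    · rintro ⟨y, hy, x, hx, rfl, rfl⟩
      exact ⟨hx.1, hx.2, hy.1, hy.2⟩
    · rintro ⟨h1, h2, h3, h4⟩
      exact ⟨cy, ⟨h3, h4⟩, cx, ⟨h1, h2⟩, rfl, rfl⟩
  obtain ⟨B1, B2, B3, B4, B5, B6⟩ := pvScan_spec m ps PySem.Set.empty []
    (fun p hp => (hpsmem p).1 hp) (by simp [PySem.Set.empty]) (by simp [PySem.Set.empty])
    (by simp [PySem.Set.empty]) ⟨[], by simp, by simp, by simp [PySem.Set.empty]⟩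
  obtain ⟨csB, hBeq, hBnd, hBmem⟩ := B6
  have hAmem' : ∀ F, F ∈ csA ↔ ∃ c, pvNZ m c ∧ F = pvCompF m c := by
    intro F
    rw [hAmem F]
    constructor
    · rintro ⟨c, hc, rfl⟩
      exact ⟨c, (htv0 c).1 hc, rfl⟩
    · rintro ⟨c, hc, rfl⟩
      exact ⟨c, (htv0 c).2 hc, rfl⟩
  have hBmem' : ∀ F, F ∈ csB ↔ ∃ c, pvNZ m c ∧ F = pvCompF m c := by
    intro F
    rw [hBmem F]
    constructor
    · rintro ⟨c, hc, rfl⟩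
      exact ⟨c, B2 c hc, rfl⟩
    · rintro ⟨c, hc, rfl⟩
      exact ⟨c, B5 c ((hpsmem c).2 hc.1) hc, rfl⟩
  have hperm : (csA.map (pvWeightF m)).Perm (csB.map (pvWeightF m)) :=
    ((List.perm_ext_iff_of_nodup hAnd hBnd).2
      (fun F => (hAmem' F).trans (hBmem' F).symm)).map (pvWeightF m)
  rw [hAeq, hBeq]
  exact pvSorted_rev_congr _ _ (by simpa using hperm)
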